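-- pv_equiv track=rewrite | github.com/ranaumarnadeem/SCOAP-Controllability-and-Observability | SCOAP_Controllibilty.py | parse_netlist
-- ===== SOURCE A (Python) =====
-- def parse_netlist(m):
--     fanout_list, out_in_fanout_list, gates_list, input_list = [], [], [], []
--     for line in m:
--         if line[0] in ['INPUT', 'OUTPUT', 'FANOUT']:
--             out_in_fanout_list.append(line)
--             if line[0] == 'INPUT':
--                 input_list.extend(map(int, line[1:]))
--             if line[0] == 'FANOUT':
--                 fanout_list.append(line)
--         else:
--             gates_list.append(line)
--     return fanout_list, out_in_fanout_list, gates_list, input_list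
-- ===== SOURCE B (Python) =====
-- def parse_netlist(m):
--     # Four independent filtering passes instead of A's single dispatching loop.
--     lines = list(m)
--     kinds = ('INPUT', 'OUTPUT', 'FANOUT')
--     fanout_list = [l for l in lines if l[0] == 'FANOUT']
--     out_in_fanout_list = [l for l in lines if l[0] in kinds]
--     gates_list = [l for l in lines if l[0] not in kinds]
--     input_list = [int(x) for l in lines if l[0] == 'INPUT' for x in l[1:]]
--     return fanout_list, out_in_fanout_list, gates_list, input_list
-- ===== Notes on version B (the rewrite author's own statement) =====
-- stated objective: alternative
-- what changed: Replaces A's single loop that dispatches each line into four accumulators with four independent filter/flatten passes over the materialized input, one per output list.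
import Mathlib
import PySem

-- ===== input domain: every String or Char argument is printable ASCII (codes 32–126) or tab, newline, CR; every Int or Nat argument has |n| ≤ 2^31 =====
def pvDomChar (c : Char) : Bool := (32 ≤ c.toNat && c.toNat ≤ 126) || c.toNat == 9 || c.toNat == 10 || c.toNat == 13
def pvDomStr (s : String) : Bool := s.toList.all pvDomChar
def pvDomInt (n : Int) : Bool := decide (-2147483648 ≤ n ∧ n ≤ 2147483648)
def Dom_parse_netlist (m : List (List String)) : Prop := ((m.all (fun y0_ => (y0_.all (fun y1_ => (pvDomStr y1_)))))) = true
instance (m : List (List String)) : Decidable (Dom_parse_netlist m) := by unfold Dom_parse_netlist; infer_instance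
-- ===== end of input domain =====

-- B differs from A by decomposition: four independent filter/flatten passes instead of one dispatching loop.
-- Equivalence of RETURN values on Pre_ (inputs on which the Python A returns normally).

-- int(s); Pre_ guarantees the parse succeeds, so the default is never used on admitted inputs
def pvIntOf (s : String) : Int := (PySem.Int.ofStr? s).getD 0

-- ===== PORT A =====
-- one pass, dispatching each line into the four accumulators, exactly as A's loop
def pvStepA (acc : List (List String) × List (List String) × List (List String) × List Int)
    (line : List String) : List (List String) × List (List String) × List (List String) × List Int :=
  let h := (PySem.List.pyGet? line 0).getD ""
  if ["INPUT", "OUTPUT", "FANOUT"].contains h then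
    ((if h = "FANOUT" then acc.1 ++ [line] else acc.1),
     acc.2.1 ++ [line],
     acc.2.2.1,
     (if h = "INPUT" then acc.2.2.2 ++ (line.tail.map pvIntOf) else acc.2.2.2))
  else
    (acc.1, acc.2.1, acc.2.2.1 ++ [line], acc.2.2.2)

def parse_netlist (m : List (List String)) : List (List String) × List (List String) × List (List String) × List Int :=
  m.foldl pvStepA ([], [], [], [])

-- ===== PORT B =====
def parse_netlist_alt (m : List (List String)) : List (List String) × List (List String) × List (List String) × List Int :=
  let hd := fun (l : List String) => (PySem.List.pyGet? l 0).getD ""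
  (m.filter (fun l => hd l = "FANOUT"),
   m.filter (fun l => ["INPUT", "OUTPUT", "FANOUT"].contains (hd l)),
   m.filter (fun l => ¬ ["INPUT", "OUTPUT", "FANOUT"].contains (hd l)),
   (m.filter (fun l => hd l = "INPUT")).flatMap (fun l => l.tail.map pvIntOf))

-- ===== PRECONDITION & SPEC =====
-- Pre_ excludes exactly the inputs on which the Python A raises: an empty line (IndexError on line[0])
-- or an INPUT line with a token int() rejects (ValueError).
def Pre_parse_netlist (m : List (List String)) : Prop :=
  ∀ line ∈ m, line ≠ [] ∧
    ((PySem.List.pyGet? line 0).getD "" = "INPUT" → ∀ s ∈ line.tail, (PySem.Int.ofStr? s).isSome)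
instance (m : List (List String)) : Decidable (Pre_parse_netlist m) := by unfold Pre_parse_netlist; infer_instance

def pvWitness_parse_netlist : List (List String) :=
  [["INPUT", "1", "2"], ["FANOUT", "3"], ["OUTPUT", "7"], ["NAND", "1", "2", "4"]]

def Spec_parse_netlist (m : List (List String)) (out : List (List String) × List (List String) × List (List String) × List Int) : Prop := out = parse_netlist_alt m
instance (m : List (List String)) (out : List (List String) × List (List String) × List (List String) × List Int) : Decidable (Spec_parse_netlist m out) := by unfold Spec_parse_netlist; infer_instance

-- ===== CLAIM (what is proved, stated in full; the proofs are below) =====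
def Claim_equal_parse_netlist : Prop := ∀ (m : List (List String)), Dom_parse_netlist m → Pre_parse_netlist m → Spec_parse_netlist m (parse_netlist m)

-- ===== LEMMAS AND PROOFS =====

theorem pvFoldA (m : List (List String))
    (f oif g : List (List String)) (inp : List Int) :
    m.foldl pvStepA (f, oif, g, inp) =
      (f ++ (parse_netlist_alt m).1,
       oif ++ (parse_netlist_alt m).2.1,
       g ++ (parse_netlist_alt m).2.2.1,
       inp ++ (parse_netlist_alt m).2.2.2) := by
  induction m generalizing f oif g inp with
  | nil => simp [parse_netlist_alt]
  | cons line rest ih =>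
    simp only [List.foldl_cons, parse_netlist_alt, List.filter_cons, List.flatMap]
    by_cases h1 : (PySem.List.pyGet? line 0).getD "" = "INPUT" <;>
      by_cases h2 : (PySem.List.pyGet? line 0).getD "" = "OUTPUT" <;>
        by_cases h3 : (PySem.List.pyGet? line 0).getD "" = "FANOUT" <;>
          simp_all [pvStepA, ih, parse_netlist_alt, List.flatMap]

-- ===== VERDICT (by name: the statement is the Claim_ definition above) =====
theorem parse_netlist_spec : Claim_equal_parse_netlist := by
  intro m _ _
  unfold Spec_parse_netlist parse_netlist
  rw [pvFoldA]
  simp
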